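-- pv_equiv track=rewrite | github.com/Ander456/py_program | day113.py | count
-- ===== SOURCE A (Python) =====
-- def count(n):
--     if n == 0:
--         return 1
--     def f(k): # 计算k位数字 unique十进制数的数量
--         ans = 9
--         for i in range(1, k):
--             ans *= 10 - 1
--         return ans
--     ans = 10 # f(0) = 1 f(1) = 9 so is 10
--     for i in range(2, n+1):
--         ans += f(i)
--     return ans
-- ===== SOURCE B (Python) =====
-- def count(n):
--     if n == 0:
--         return 1
--     if n < 2:
--         return 10
--     return 10 + (9**(n+1) - 81) // 8
-- ===== Notes on version B (the rewrite author's own statement) =====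
-- stated objective: faster
-- what changed: Replaced the nested loops (outer sum over i, inner repeated multiplication) by the closed form of the geometric series, computed with one fast exponentiation and one exact integer division, keeping A's early returns for the zero and below-two cases.
import Mathlib
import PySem

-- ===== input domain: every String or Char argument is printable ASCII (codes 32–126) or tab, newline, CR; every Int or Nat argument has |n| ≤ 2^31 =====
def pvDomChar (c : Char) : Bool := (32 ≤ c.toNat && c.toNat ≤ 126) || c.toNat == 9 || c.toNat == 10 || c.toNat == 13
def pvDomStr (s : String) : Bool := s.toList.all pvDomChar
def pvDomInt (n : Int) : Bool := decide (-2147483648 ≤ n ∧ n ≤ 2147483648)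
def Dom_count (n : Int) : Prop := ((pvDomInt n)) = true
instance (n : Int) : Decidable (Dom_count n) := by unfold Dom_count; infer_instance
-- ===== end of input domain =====

-- B replaces A's nested summation loops by the closed form 10 + (9^(n+1) - 81) // 8 (simpler).

-- ===== PORT A =====
-- inner helper f(k): ans = 9; for i in range(1, k): ans *= 10 - 1
def count_f (k : Int) : Int :=
  (PySem.List.pyRange 1 k 1).foldl (fun ans _ => ans * (10 - 1)) 9

def count (n : Int) : Int :=
  if n = 0 then 1
  else (PySem.List.pyRange 2 (n + 1) 1).foldl (fun ans i => ans + count_f i) 10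

-- ===== PORT B =====
def count_alt (n : Int) : Int :=
  if n = 0 then 1
  else if n < 2 then 10
  else 10 + PySem.Int.floordiv ((9 : Int) ^ (n + 1).toNat - 81) 8

-- ===== PRECONDITION & SPEC =====
def Spec_count (n : Int) (out : Int) : Prop := out = count_alt n
instance (n : Int) (out : Int) : Decidable (Spec_count n out) := by unfold Spec_count; infer_instance

-- ===== CLAIM (what is proved, stated in full; the proofs are below) =====
def Claim_equal_count : Prop := ∀ (n : Int), Dom_count n → Spec_count n (count n)

-- ===== LEMMAS AND PROOFS =====

-- the inner loop of f multiplies 9 by 9 once per element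
theorem count_f_loop (l : List Int) (a : Int) :
    l.foldl (fun ans _ => ans * (10 - 1)) a = a * 9 ^ l.length := by
  induction l generalizing a with
  | nil => simp
  | cons x xs ih => rw [List.foldl_cons, ih, List.length_cons, pow_succ]; ring

theorem count_f_eq (k : Int) : count_f k = 9 * 9 ^ (k - 1).toNat := by
  rw [count_f, count_f_loop, PySem.List.length_pyRange_one]

-- characterisation of A's outer loop for n ≥ 1: eight times the sum is 9^(n+1) - 81 + 80
theorem count_sum (n : Int) (hn : 1 ≤ n) :
    8 * (PySem.List.pyRange 2 (n + 1) 1).foldl (fun ans i => ans + count_f i) 10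
      = (9 : Int) ^ (n + 1).toNat - 81 + 80 := by
  induction n, hn using Int.le_induction with
  | base =>
      norm_num [PySem.List.pyRange_one_eq_nil]
      decide
  | succ m hm ih =>
      rw [show m + 1 + 1 = (m + 1) + 1 by ring,
          PySem.List.pyRange_one_succ_right (by omega), List.foldl_append]
      simp only [List.foldl]
      rw [count_f_eq]
      have h1 : (m + 1 - 1).toNat = m.toNat := by omega
      have h2 : (m + 1 + 1).toNat = m.toNat + 2 := by omega
      have h3 : (m + 1).toNat = m.toNat + 1 := by omega
      rw [h1, h2]
      rw [h3] at ih
      rw [mul_add, ih]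
      ring

theorem count_spec : Claim_equal_count := by
  intro n _
  unfold Spec_count count count_alt
  by_cases h0 : n = 0
  · simp [h0]
  · simp only [h0, if_false]
    by_cases h2 : n < 2
    · rw [PySem.List.pyRange_one_eq_nil (by omega)]
      simp [h2]
    · simp only [h2, if_false]
      have hs := count_sum n (by omega)
      have hq : (9 : Int) ^ (n + 1).toNat - 81 =
          8 * ((PySem.List.pyRange 2 (n + 1) 1).foldl (fun ans i => ans + count_f i) 10 - 10) := by
        omega
      rw [hq, PySem.Int.floordiv_eq_ediv_of_pos (by norm_num),
          Int.mul_ediv_cancel_left _ (by norm_num)]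
      ring
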